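-- pv_equiv track=rewrite | github.com/maxpoletto/advent-of-code | 2015/day25.py | val_at_pos
-- ===== SOURCE A (Python) =====
-- def val_at_pos(rr, cc):
--     r, c, n = 1, 1, 20151125
--     while r < rr or c < cc:
--         n = (n * 252533) % 33554393
--         r, c = r-1, c+1
--         if r == 0:
--             r, c = c, 1
--     return n
-- ===== SOURCE B (Python) =====
-- def val_at_pos(rr, cc):
--     # Positions off the grid (rr < 1 or cc < 1) clamp to 1, matching the walk's stopping rule.
--     r, c = max(rr, 1), max(cc, 1)
--     # (r, c) is the (k+1)-th cell of the diagonal walk: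
--     k = (r + c - 2) * (r + c - 1) // 2 + c - 1
--     return (20151125 * pow(252533, k, 33554393)) % 33554393
-- ===== Notes on version B (the rewrite author's own statement) =====
-- stated objective: faster
-- what changed: Replaces the step-by-step diagonal walk (one modular multiply per visited cell) with the closed-form index of the target cell plus three-argument pow (modular exponentiation).
import Mathlib
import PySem

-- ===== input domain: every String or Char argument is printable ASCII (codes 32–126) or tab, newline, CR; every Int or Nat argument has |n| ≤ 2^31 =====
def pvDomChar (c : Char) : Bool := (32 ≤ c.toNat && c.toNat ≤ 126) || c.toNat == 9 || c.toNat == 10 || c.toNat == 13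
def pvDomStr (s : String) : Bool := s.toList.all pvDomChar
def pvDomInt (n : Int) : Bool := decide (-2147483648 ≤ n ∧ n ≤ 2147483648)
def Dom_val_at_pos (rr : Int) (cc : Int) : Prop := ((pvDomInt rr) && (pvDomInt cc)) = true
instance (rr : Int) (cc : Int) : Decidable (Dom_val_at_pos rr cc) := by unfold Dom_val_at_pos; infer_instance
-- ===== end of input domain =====

-- B replaces A's cell-by-cell diagonal walk by the closed-form cell index and modular
-- exponentiation (objective: faster; a timing run measures the speed-up).

-- ===== PORT A =====
-- A's while loop, as structural recursion on a fuel that (provably) dominates the number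
-- of iterations; the fuel guard only makes the same computation total.
def valLoop (rr : Int) (cc : Int) : Nat → Int → Int → Int → Int
  | 0, _, _, n => n
  | fuel+1, r, c, n =>
    if r < rr ∨ c < cc then
      let n' := (n * 252533) % 33554393
      let r' := r - 1
      let c' := c + 1
      if r' = 0 then valLoop rr cc fuel c' 1 n'
      else valLoop rr cc fuel r' c' n'
    else n

def val_at_pos (rr : Int) (cc : Int) : Int :=
  valLoop rr cc ((rr.natAbs + cc.natAbs + 2) * (rr.natAbs + cc.natAbs + 2)) 1 1 20151125

-- ===== PORT B =====
-- pow(252533, k, 33554393) is ported as modular exponentiation's value 252533 ^ k % 33554393.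
def val_at_pos_alt (rr : Int) (cc : Int) : Int :=
  let r := max rr 1
  let c := max cc 1
  let k := PySem.Int.floordiv ((r + c - 2) * (r + c - 1)) 2 + c - 1
  (20151125 * ((252533 : Int) ^ k.toNat % 33554393)) % 33554393

-- ===== PRECONDITION & SPEC =====
def Spec_val_at_pos (rr : Int) (cc : Int) (out : Int) : Prop := out = val_at_pos_alt rr cc
instance (rr : Int) (cc : Int) (out : Int) : Decidable (Spec_val_at_pos rr cc out) := by unfold Spec_val_at_pos; infer_instance

-- ===== CLAIM (what is proved, stated in full; the proofs are below) =====
def Claim_equal_val_at_pos : Prop := ∀ (rr : Int) (cc : Int), Dom_val_at_pos rr cc → Spec_val_at_pos rr cc (val_at_pos rr cc)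

-- ===== LEMMAS AND PROOFS =====

-- 1-based index of cell (r, c) along the diagonal walk.
def pvIdx (r : Int) (c : Int) : Int := (r + c - 2) * (r + c - 1) / 2 + c

theorem pvTri_succ (s : Int) : (s - 1) * s / 2 = (s - 2) * (s - 1) / 2 + (s - 1) := by
  have h : (s - 1) * s = (s - 2) * (s - 1) + (s - 1) * 2 := by ring
  rw [h, Int.add_mul_ediv_right _ _ (by norm_num : (2:Int) ≠ 0)]

theorem pvTri_mono {a b : Int} (ha : 2 ≤ a) (hab : a ≤ b) :
    (a - 2) * (a - 1) / 2 ≤ (b - 2) * (b - 1) / 2 := by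
  apply Int.ediv_le_ediv (by norm_num)
  nlinarith

theorem pvIdx_lt_of_sum_lt {r c R C : Int} (hr : 1 ≤ r) (hc : 1 ≤ c)
    (hC : 1 ≤ C) (h : r + c < R + C) : pvIdx r c < pvIdx R C := by
  unfold pvIdx
  have h1 : (r + c - 2) * (r + c - 1) / 2 + c ≤ (r + c - 1) * (r + c) / 2 := by
    rw [pvTri_succ (r + c)]; omega
  have h2 : (r + c - 1) * (r + c) / 2 ≤ (R + C - 2) * (R + C - 1) / 2 := by
    have := pvTri_mono (a := r + c + 1) (b := R + C) (by omega) (by omega)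
    have e : (r + c + 1 - 2) * (r + c + 1 - 1) = (r + c - 1) * (r + c) := by ring
    rwa [e] at this
  omega

theorem pvIdx_inj {r c R C : Int} (hr : 1 ≤ r) (hc : 1 ≤ c) (hR : 1 ≤ R) (hC : 1 ≤ C)
    (h : pvIdx r c = pvIdx R C) : r = R ∧ c = C := by
  rcases lt_trichotomy (r + c) (R + C) with hs | hs | hs
  · exact absurd h (by have := pvIdx_lt_of_sum_lt hr hc hC hs; omega)
  · have : c = C := by
      unfold pvIdx at h
      have e : (r + c - 2) * (r + c - 1) = (R + C - 2) * (R + C - 1) := by rw [hs]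
      omega
    constructor <;> omega
  · exact absurd h (by have := pvIdx_lt_of_sum_lt hR hC hc hs; omega)

theorem pvIdx_step_in (r c : Int) (h : 2 ≤ r) : pvIdx (r - 1) (c + 1) = pvIdx r c + 1 := by
  unfold pvIdx
  have e : (r - 1 + (c + 1) - 2) * (r - 1 + (c + 1) - 1) = (r + c - 2) * (r + c - 1) := by ring
  rw [e]; omega

theorem pvIdx_step_wrap (c : Int) : pvIdx (c + 1) 1 = pvIdx 1 c + 1 := by
  unfold pvIdx
  have e : (c + 1 + 1 - 2) * (c + 1 + 1 - 1) = (1 + c - 2) * (1 + c - 1) + 2 * c := by ring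
  omega

theorem pvMod_mul_pow (n x : Int) (e : Nat) :
    (n % 33554393 * x ^ e) % 33554393 = (n * x ^ e) % 33554393 := by
  rw [Int.mul_emod, Int.emod_emod_of_dvd _ dvd_rfl, ← Int.mul_emod]

-- One unfolding of the loop.
theorem valLoop_succ (rr cc : Int) (f : Nat) (r c n : Int) :
    valLoop rr cc (f + 1) r c n =
      if r < rr ∨ c < cc then
        (if r - 1 = 0 then valLoop rr cc f (c + 1) 1 (n * 252533 % 33554393)
         else valLoop rr cc f (r - 1) (c + 1) (n * 252533 % 33554393))
      else n := rfl

-- Loop invariant: from a reachable cell (r, c) with enough fuel the loop multiplies n by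
-- 252533 once per remaining step (mod 33554393).
theorem valLoop_eq (rr cc : Int) : ∀ (fuel : Nat) (r c n : Int), 1 ≤ r → 1 ≤ c →
    pvIdx r c ≤ pvIdx (max rr 1) (max cc 1) →
    pvIdx (max rr 1) (max cc 1) - pvIdx r c ≤ (fuel : Int) →
    0 ≤ n → n < 33554393 →
    valLoop rr cc fuel r c n =
      (n * 252533 ^ (pvIdx (max rr 1) (max cc 1) - pvIdx r c).toNat) % 33554393 := by
  intro fuel
  induction fuel with
  | zero =>
    intro r c n _ _ hle hf hn0 hn1
    have : pvIdx r c = pvIdx (max rr 1) (max cc 1) := by omega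
    simp [valLoop, this, Int.emod_eq_of_lt hn0 hn1]
  | succ f ih =>
    intro r c n hr hc hle hf hn0 hn1
    set T := pvIdx (max rr 1) (max cc 1) with hT
    by_cases hcond : r < rr ∨ c < cc
    · -- still walking: current cell is not the target, so its index is strictly below T
      have hne : ¬(r = max rr 1 ∧ c = max cc 1) := by
        rcases hcond with h | h
        · intro ⟨h1, _⟩; omega
        · intro ⟨_, h2⟩; omega
      have hlt : pvIdx r c < T := by
        rcases lt_or_eq_of_le hle with h | h
        · exact h
        · exact absurd (pvIdx_inj hr hc (le_max_right rr 1) (le_max_right cc 1) h) hne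
      have hn0' : 0 ≤ n * 252533 % 33554393 := Int.emod_nonneg _ (by norm_num)
      have hn1' : n * 252533 % 33554393 < 33554393 := Int.emod_lt_of_pos _ (by norm_num)
      by_cases hw : r - 1 = 0
      · -- wrap to the next diagonal
        have hr1 : r = 1 := by omega
        have hstep : pvIdx (c + 1) 1 = pvIdx r c + 1 := by rw [hr1]; exact pvIdx_step_wrap c
        rw [valLoop_succ, if_pos hcond, if_pos hw,
          ih (c + 1) 1 (n * 252533 % 33554393) (by omega) le_rfl (by omega) (by omega) hn0' hn1',
          hstep]
        have he : (T - pvIdx r c).toNat = (T - (pvIdx r c + 1)).toNat + 1 := by omega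
        rw [he, pow_succ, pvMod_mul_pow]
        rw [show n * 252533 * 252533 ^ (T - (pvIdx r c + 1)).toNat
              = n * (252533 ^ (T - (pvIdx r c + 1)).toNat * 252533) from by ring]
      · -- step within the diagonal
        have hr2 : 2 ≤ r := by omega
        have hstep : pvIdx (r - 1) (c + 1) = pvIdx r c + 1 := pvIdx_step_in r c hr2
        rw [valLoop_succ, if_pos hcond, if_neg hw,
          ih (r - 1) (c + 1) (n * 252533 % 33554393) (by omega) (by omega) (by omega) (by omega)
            hn0' hn1',
          hstep]
        have he : (T - pvIdx r c).toNat = (T - (pvIdx r c + 1)).toNat + 1 := by omega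
        rw [he, pow_succ, pvMod_mul_pow]
        rw [show n * 252533 * 252533 ^ (T - (pvIdx r c + 1)).toNat
              = n * (252533 ^ (T - (pvIdx r c + 1)).toNat * 252533) from by ring]
    · -- loop condition false: the current cell IS the target
      rw [valLoop_succ, if_neg hcond]
      push_neg at hcond
      have hsum : r + c = max rr 1 + max cc 1 := by
        by_contra hne
        have hlt' : max rr 1 + max cc 1 < r + c := by omega
        have := pvIdx_lt_of_sum_lt (le_max_right rr 1) (le_max_right cc 1) hc hlt'
        omega
      have hrc : pvIdx r c = T := by
        have hcC : c = max cc 1 := by omega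
        have hrR : r = max rr 1 := by omega
        rw [hT, hcC, hrR]
      rw [hrc, sub_self]
      simp [Int.emod_eq_of_lt hn0 hn1]

theorem pvIdx_one_one : pvIdx 1 1 = 1 := by norm_num [pvIdx]

theorem pvT_ge_one (R C : Int) (hR : 1 ≤ R) (hC : 1 ≤ C) : 1 ≤ pvIdx R C := by
  unfold pvIdx
  have h0 : 0 ≤ (R + C - 2) * (R + C - 1) / 2 :=
    Int.ediv_nonneg (by nlinarith) (by norm_num)
  omega

-- ===== VERDICT (by name: the statement is the Claim_ definition above) =====
theorem val_at_pos_spec : Claim_equal_val_at_pos := by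
  intro rr cc _
  unfold Spec_val_at_pos val_at_pos val_at_pos_alt
  set R := max rr 1 with hR
  set C := max cc 1 with hC
  have hR1 : 1 ≤ R := le_max_right rr 1
  have hC1 : 1 ≤ C := le_max_right cc 1
  have hT1 : 1 ≤ pvIdx R C := pvT_ge_one R C hR1 hC1
  -- fuel dominates the number of iterations
  have hfuel : pvIdx R C - 1 ≤
      (((rr.natAbs + cc.natAbs + 2) * (rr.natAbs + cc.natAbs + 2) : Nat) : Int) := by
    set F : Int := (rr.natAbs : Int) + cc.natAbs + 2 with hF
    have hRF : R ≤ (rr.natAbs : Int) + 1 := by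
      have := Int.le_natAbs (a := rr); omega
    have hCF : C ≤ (cc.natAbs : Int) + 1 := by
      have := Int.le_natAbs (a := cc); omega
    have hSF : R + C ≤ F := by omega
    have hmono : (R + C - 2) * (R + C - 1) / 2 ≤ (F - 2) * (F - 1) / 2 :=
      pvTri_mono (by omega) hSF
    have hself : (F - 2) * (F - 1) / 2 ≤ (F - 2) * (F - 1) :=
      Int.ediv_le_self _ (by nlinarith)
    have hcast : (((rr.natAbs + cc.natAbs + 2) * (rr.natAbs + cc.natAbs + 2) : Nat) : Int)
        = F * F := by push_cast [hF]; ring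
    have : pvIdx R C ≤ (F - 2) * (F - 1) + C := by unfold pvIdx; omega
    rw [hcast]; nlinarith
  have hmain := valLoop_eq rr cc
    ((rr.natAbs + cc.natAbs + 2) * (rr.natAbs + cc.natAbs + 2)) 1 1 20151125
    le_rfl le_rfl (by rw [pvIdx_one_one]; exact hT1) (by rw [pvIdx_one_one]; omega)
    (by norm_num) (by norm_num)
  rw [← hR, ← hC] at hmain
  rw [hmain, pvIdx_one_one]
  -- identify B's exponent with T - 1
  have hk : PySem.Int.floordiv ((R + C - 2) * (R + C - 1)) 2 + C - 1 = pvIdx R C - 1 := by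
    rw [PySem.Int.floordiv_eq_ediv_of_pos (by norm_num)]; unfold pvIdx; omega
  simp only [hk]
  conv_lhs => rw [Int.mul_emod]
  rw [show (20151125 : Int) % 33554393 = 20151125 from by decide]
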